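-- pv_equiv track=rewrite | github.com/qi-rub/stabilizer-rank-simulator | simulator/counter.py | reorder_qiskit_counter
-- ===== SOURCE A (Python) =====
-- def reorder_qiskit_counter(num_qubits, count_dict):
--     """
--     Qiskit's count dictionary uses a different qubit order so this function converts their count dictionary and converts it to our convention. It also sorts the binary strings in increasing order.
--     """
--
--     ordered_dict = {}
--     for i in range(2 ** num_qubits):
--         bin_str = format(i, "0" + str(num_qubits) + "b")
--         try:
--             ordered_dict[bin_str] = count_dict[bin_str[::-1]]
--         except KeyError:
--             ordered_dict[bin_str] = 0
--     return ordered_dict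
-- ===== SOURCE B (Python) =====
-- def reorder_qiskit_counter(num_qubits, count_dict):
--     """
--     Same conversion as A, but built the other way round: first zero-fill all
--     2**num_qubits ordered keys, then scatter the input counts through one pass
--     over count_dict (reversal preserves length, so the membership check drops
--     exactly the keys A's lookup would miss).
--     """
--     ordered_dict = {format(i, "0" + str(num_qubits) + "b"): 0 for i in range(2 ** num_qubits)}
--     for key, value in count_dict.items():
--         reversed_key = key[::-1]
--         if reversed_key in ordered_dict:
--             ordered_dict[reversed_key] = value
--     return ordered_dict
-- ===== Notes on version B (the rewrite author's own statement) =====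
-- stated objective: alternative
-- what changed: Instead of A's per-output try/except lookup into count_dict for each of the 2**n keys, B zero-fills the ordered dict once and then scatters the counts in a single input-driven pass over count_dict.items(), guarded by a membership test on the reversed key.
import Mathlib
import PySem

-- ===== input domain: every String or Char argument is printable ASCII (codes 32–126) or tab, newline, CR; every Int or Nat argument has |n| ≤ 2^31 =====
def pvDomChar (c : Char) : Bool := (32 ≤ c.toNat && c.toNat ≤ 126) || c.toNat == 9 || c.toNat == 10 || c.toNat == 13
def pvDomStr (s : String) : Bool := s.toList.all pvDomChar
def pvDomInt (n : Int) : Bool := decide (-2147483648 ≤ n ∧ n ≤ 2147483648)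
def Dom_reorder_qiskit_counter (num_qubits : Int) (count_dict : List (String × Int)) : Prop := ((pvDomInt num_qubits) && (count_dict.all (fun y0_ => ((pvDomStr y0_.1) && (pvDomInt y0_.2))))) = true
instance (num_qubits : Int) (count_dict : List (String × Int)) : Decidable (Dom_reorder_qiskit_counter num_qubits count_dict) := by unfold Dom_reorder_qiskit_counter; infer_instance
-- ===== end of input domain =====

-- B replaces A's per-output try/except lookup by a zero-fill of all 2^n keys followed by one
-- input-driven scatter pass over count_dict (objective: alternative decomposition, same cost).

-- ===== PORT A =====

-- s[::-1] on a string (exact: Python string slice with step -1 is the character reverse)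
def strRev (s : String) : String := String.ofList s.toList.reverse

-- bin(i)[2:] as a list of chars ('0' for i = 0), msb first — hand port of Python's binary formatting
def pyBin (i : Nat) : List Char :=
  if _h : i < 2 then [if i = 1 then '1' else '0']
  else pyBin (i / 2) ++ [if i % 2 = 1 then '1' else '0']
decreasing_by omega

-- format(i, "0" + str(n) + "b"): binary digits of i left-padded with '0' to width n (exact for n ≥ 0)
def pyBinFormat (n : Nat) (i : Nat) : String :=
  String.ofList (List.replicate (n - (pyBin i).length) '0' ++ pyBin i)

def reorder_qiskit_counter (num_qubits : Int) (count_dict : List (String × Int)) : List (String × Int) :=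
  let d := PySem.Dict.mk count_dict
  (((List.range (2 ^ num_qubits.toNat)).foldl (fun od i =>
      let bin_str := pyBinFormat num_qubits.toNat i
      match d.get? (strRev bin_str) with          -- try: count_dict[bin_str[::-1]]
      | some v => od.insert bin_str v
      | none   => od.insert bin_str 0)            -- except KeyError: 0
    PySem.Dict.empty)).items

-- ===== PORT B =====

def reorder_qiskit_counter_alt (num_qubits : Int) (count_dict : List (String × Int)) : List (String × Int) :=
  -- ordered_dict = {format(i, …): 0 for i in range(2 ** num_qubits)}
  let ordered0 := (List.range (2 ^ num_qubits.toNat)).foldl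
      (fun od i => od.insert (pyBinFormat num_qubits.toNat i) 0) PySem.Dict.empty
  -- for key, value in count_dict.items(): if key[::-1] in ordered_dict: ordered_dict[key[::-1]] = value
  (count_dict.foldl (fun od kv =>
      let rk := strRev kv.1
      if od.contains rk then od.insert rk kv.2 else od) ordered0).items

-- ===== PRECONDITION & SPEC =====
-- Pre_ excludes negative num_qubits, where A raises TypeError (range(2**n) on a float), and
-- association lists with duplicate keys, which a Python dict cannot hold (first-vs-last match
-- on the list representation is a defensible corner neither program specifies).
def Pre_reorder_qiskit_counter (num_qubits : Int) (count_dict : List (String × Int)) : Prop :=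
  0 ≤ num_qubits ∧ (count_dict.map Prod.fst).Nodup
instance (num_qubits : Int) (count_dict : List (String × Int)) : Decidable (Pre_reorder_qiskit_counter num_qubits count_dict) := by unfold Pre_reorder_qiskit_counter; infer_instance

def pvWitness_reorder_qiskit_counter : Int × (List (String × Int)) := (1, [("0", 3)])

def Spec_reorder_qiskit_counter (num_qubits : Int) (count_dict : List (String × Int)) (out : List (String × Int)) : Prop := out = reorder_qiskit_counter_alt num_qubits count_dict
instance (num_qubits : Int) (count_dict : List (String × Int)) (out : List (String × Int)) : Decidable (Spec_reorder_qiskit_counter num_qubits count_dict out) := by unfold Spec_reorder_qiskit_counter; infer_instance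

-- ===== CLAIM (what is proved, stated in full; the proofs are below) =====
def Claim_equal_reorder_qiskit_counter : Prop := ∀ (num_qubits : Int) (count_dict : List (String × Int)), Dom_reorder_qiskit_counter num_qubits count_dict → Pre_reorder_qiskit_counter num_qubits count_dict → Spec_reorder_qiskit_counter num_qubits count_dict (reorder_qiskit_counter num_qubits count_dict)

-- ===== LEMMAS AND PROOFS =====

theorem strRev_strRev (s : String) : strRev (strRev s) = s := by
  simp [strRev, String.toList_ofList, String.ofList_toList]

theorem strRev_eq_iff (a b : String) : strRev a = b ↔ a = strRev b := by
  constructor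
  · rintro rfl; exact (strRev_strRev a).symm
  · rintro rfl; exact strRev_strRev b

def binStep (a : Nat) (c : Char) : Nat := 2 * a + (if c = '1' then 1 else 0)

theorem parse_pyBin (i : Nat) : List.foldl binStep 0 (pyBin i) = i := by
  induction i using Nat.strong_induction_on with
  | _ i ih =>
    rw [pyBin]
    split
    · rename_i h
      interval_cases i <;> simp [binStep]
    · rename_i h
      rw [List.foldl_append, ih (i / 2) (by omega)]
      simp only [List.foldl, binStep]
      split <;> rename_i h2 <;> simp <;> omega

theorem parse_pad (k : Nat) (cs : List Char) :
    List.foldl binStep 0 (List.replicate k '0' ++ cs) = List.foldl binStep 0 cs := by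
  induction k with
  | zero => simp
  | succ k ih => simpa [List.replicate_succ, binStep] using ih

theorem pyBinFormat_inj (n : Nat) : Function.Injective (pyBinFormat n) := by
  intro i j h
  have h' : List.replicate (n - (pyBin i).length) '0' ++ pyBin i
      = List.replicate (n - (pyBin j).length) '0' ++ pyBin j := by
    have := congrArg String.toList h
    simpa [pyBinFormat, String.toList_ofList] using this
  have := congrArg (List.foldl binStep 0) h'
  rwa [parse_pad, parse_pad, parse_pyBin, parse_pyBin] at this

-- the value the scatter pass of B leaves at key k, starting from d
def scat (cd : List (String × Int)) (k : String) (d : Int) : Int :=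
  cd.foldl (fun a q => if strRev q.1 = k then q.2 else a) d

theorem scat_of_not_mem (cd : List (String × Int)) (k : String) (d : Int)
    (h : ∀ q ∈ cd, strRev q.1 ≠ k) : scat cd k d = d := by
  induction cd with
  | nil => rfl
  | cons q cd ih =>
    have hq := h q (by simp)
    simp only [scat, List.foldl_cons, if_neg hq]
    exact ih (fun q' hq' => h q' (by simp [hq']))

theorem scat_eq_get? (cd : List (String × Int)) (k : String)
    (hnd : (cd.map Prod.fst).Nodup) (d : Int) :
    scat cd k d = ((PySem.Dict.mk cd).get? (strRev k)).getD d := by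
  induction cd generalizing d with
  | nil => rfl
  | cons q cd ih =>
    have hnd' : (cd.map Prod.fst).Nodup := (List.nodup_cons.mp hnd).2
    have hq1 : q.1 ∉ cd.map Prod.fst := (List.nodup_cons.mp hnd).1
    have hcons : scat (q :: cd) k d = scat cd k (if strRev q.1 = k then q.2 else d) := rfl
    rw [hcons, PySem.Dict.get?_mk_cons]
    by_cases hq : q.1 = strRev k
    · have hrev : strRev q.1 = k := by rw [strRev_eq_iff]; exact hq
      rw [if_pos hrev, if_pos (by simp [hq])]
      simp only [Option.getD_some]
      exact scat_of_not_mem cd k q.2 (fun q' hq' hc => by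
        apply hq1
        have : q'.1 = strRev k := (strRev_eq_iff q'.1 k).mp hc
        rw [← hq] at this
        rw [← this]
        exact List.mem_map_of_mem hq')
    · have hrev : strRev q.1 ≠ k := fun hc => hq ((strRev_eq_iff q.1 k).mp hc)
      rw [if_neg hrev, if_neg (by simpa using hq)]
      exact ih hnd' d

theorem step_items (od : PySem.Dict String Int) (q : String × Int) :
    (if od.contains (strRev q.1) then od.insert (strRev q.1) q.2 else od).items
      = od.items.map (fun p => if strRev q.1 = p.1 then (p.1, q.2) else p) := by
  by_cases hc : od.contains (strRev q.1)
  · rw [if_pos hc, PySem.Dict.items_insert_of_contains od q.2 hc]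
    apply List.map_congr_left
    intro p _
    by_cases hp : p.1 = strRev q.1
    · simp [hp]
    · have : strRev q.1 ≠ p.1 := fun hcc => hp hcc.symm
      simp [hp, this]
  · rw [if_neg hc]
    have hmem : strRev q.1 ∉ od.keys := fun hm => hc ((PySem.Dict.contains_iff_mem_keys od _).mpr hm)
    have : ∀ p ∈ od.items, (if strRev q.1 = p.1 then (p.1, q.2) else p) = p := by
      intro p hp
      rw [if_neg]
      intro hcc
      apply hmem
      rw [hcc]
      exact PySem.Dict.mem_keys_of_mem_items od hp
    rw [List.map_congr_left this]
    simp

theorem step_keys (od : PySem.Dict String Int) (q : String × Int) :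
    (if od.contains (strRev q.1) then od.insert (strRev q.1) q.2 else od).keys = od.keys := by
  by_cases hc : od.contains (strRev q.1)
  · rw [if_pos hc, PySem.Dict.keys_insert_of_contains od q.2 hc]
  · rw [if_neg hc]

theorem phase2_items (cd : List (String × Int)) :
    ∀ (od : PySem.Dict String Int), od.keys.Nodup →
      (cd.foldl (fun od kv =>
          let rk := strRev kv.1
          if od.contains rk then od.insert rk kv.2 else od) od).items
        = od.items.map (fun p => (p.1, scat cd p.1 p.2)) := by
  induction cd with
  | nil =>
    intro od _
    simp [scat]
  | cons q cd ih =>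
    intro od hnd
    rw [List.foldl_cons]
    have hnd' : (if od.contains (strRev q.1) then od.insert (strRev q.1) q.2 else od).keys.Nodup := by
      rw [step_keys]; exact hnd
    rw [ih _ hnd', step_items od q, List.map_map]
    apply List.map_congr_left
    intro p _
    have hcons : ∀ d, scat (q :: cd) p.1 d = scat cd p.1 (if strRev q.1 = p.1 then q.2 else d) := fun d => rfl
    by_cases hp : strRev q.1 = p.1 <;> simp [Function.comp, hp, hcons]

-- ===== VERDICT (by name: the statement is the Claim_ definition above) =====

theorem reorder_qiskit_counter_spec : Claim_equal_reorder_qiskit_counter := by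
  intro num_qubits count_dict _ hpre
  unfold Spec_reorder_qiskit_counter
  unfold reorder_qiskit_counter reorder_qiskit_counter_alt
  set m := num_qubits.toNat with hm
  set d := PySem.Dict.mk count_dict with hd
  have hKnd : ((List.range (2 ^ m)).map (pyBinFormat m)).Nodup :=
    (List.nodup_range).map (pyBinFormat_inj m)
  -- A's loop body is a single insert of the default-0 lookup
  have hbodyA : (fun (od : PySem.Dict String Int) (i : Nat) =>
        let bin_str := pyBinFormat m i
        match d.get? (strRev bin_str) with
        | some v => od.insert bin_str v
        | none   => od.insert bin_str 0)
      = (fun od i => od.insert (pyBinFormat m i) ((d.get? (strRev (pyBinFormat m i))).getD 0)) := by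
    funext od i
    cases h : d.get? (strRev (pyBinFormat m i)) <;> simp [h]
  have hA : ((List.range (2 ^ m)).foldl (fun od i =>
        let bin_str := pyBinFormat m i
        match d.get? (strRev bin_str) with
        | some v => od.insert bin_str v
        | none   => od.insert bin_str 0) PySem.Dict.empty).items
      = (List.range (2 ^ m)).map
          (fun i => (pyBinFormat m i, (d.get? (strRev (pyBinFormat m i))).getD 0)) := by
    rw [hbodyA]
    rw [PySem.Dict.items_foldl_insert_fresh (List.range (2 ^ m)) (pyBinFormat m) _ PySem.Dict.empty
      (fun a _ => PySem.Dict.contains_empty _) hKnd]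
    rfl
  have h0 : ((List.range (2 ^ m)).foldl
        (fun od i => od.insert (pyBinFormat m i) 0) PySem.Dict.empty).items
      = (List.range (2 ^ m)).map (fun i => (pyBinFormat m i, (0 : Int))) := by
    rw [PySem.Dict.items_foldl_insert_fresh (List.range (2 ^ m)) (pyBinFormat m)
      (fun _ => (0 : Int)) PySem.Dict.empty (fun a _ => PySem.Dict.contains_empty _) hKnd]
    rfl
  have h0keys : ((List.range (2 ^ m)).foldl
        (fun od i => od.insert (pyBinFormat m i) (0 : Int)) PySem.Dict.empty).keys.Nodup := by
    simp only [PySem.Dict.keys, h0, List.map_map]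
    simpa [Function.comp] using hKnd
  rw [hA, phase2_items count_dict _ h0keys, h0, List.map_map]
  apply List.map_congr_left
  intro i _
  simp only [Function.comp]
  rw [scat_eq_get? count_dict _ hpre.2]
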